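-- pv_equiv track=rewrite | github.com/TomekWojdyla/pp1 | 12-Test3/mock2/p1.py | f
-- ===== SOURCE A (Python) =====
-- def f(n):
--     string = str(n)
--     lent = len(string)
--     odd = []
--     for i in range(lent):
--         dig = int(string[i])
--         if dig%2 ==0:
--             pass
--         else:
--             odd.append(int(string[i]))
--     if odd==[]:
--         outp = -1
--     else:
--         odd.sort()
--         outp = odd[-1]-odd[0]
--     return outp
-- ===== SOURCE B (Python) =====
-- def f(n):
--     lo = None
--     hi = None
--     for ch in str(n):
--         dig = int(ch)
--         if dig % 2 == 1:
--             lo = dig if lo is None else min(lo, dig)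
--             hi = dig if hi is None else max(hi, dig)
--     if lo is None:
--         return -1
--     return hi - lo
-- ===== Notes on version B (the rewrite author's own statement) =====
-- stated objective: simpler
-- what changed: Replaces collecting all odd digits into a list and sorting it with a single pass tracking running min and max of the odd digits; Pre_ excludes negative n, on which both implementations raise ValueError at int('-').
import Mathlib
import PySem

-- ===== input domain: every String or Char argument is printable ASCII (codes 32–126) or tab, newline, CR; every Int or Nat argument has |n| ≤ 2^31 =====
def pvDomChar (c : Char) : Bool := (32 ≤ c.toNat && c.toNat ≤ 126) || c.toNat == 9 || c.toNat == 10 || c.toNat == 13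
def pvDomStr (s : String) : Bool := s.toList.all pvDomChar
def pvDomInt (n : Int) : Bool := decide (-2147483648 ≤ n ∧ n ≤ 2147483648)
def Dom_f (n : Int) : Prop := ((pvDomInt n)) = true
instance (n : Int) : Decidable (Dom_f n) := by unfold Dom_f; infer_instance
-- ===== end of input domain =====

-- B replaces building a list of the odd digits and sorting it with a single pass
-- that tracks the running min and max of the odd digits (objective: simpler).

-- int(ch) on a single character; Pre_f restricts to n ≥ 0, where every character of
-- str(n) is a digit, so ofChars? is always `some` and the `.getD 0` default is unreachable.
def pvChInt (c : Char) : Int := (PySem.Int.ofChars? [c]).getD 0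

-- ===== PORT A =====
def f (n : Int) : Int :=
  let string := PySem.Int.toChars n
  let odd : List Int := string.foldl (fun acc c =>
      let dig := pvChInt c
      if PySem.Int.mod dig 2 = 0 then acc else acc ++ [pvChInt c]) []
  if odd = [] then -1
  else
    let o := PySem.List.sorted odd (fun x => x) false
    -- odd is nonempty here, so odd[-1] / odd[0] cannot raise; `.getD 0` is unreachable
    (PySem.List.pyGet? o (-1)).getD 0 - (PySem.List.pyGet? o 0).getD 0

-- ===== PORT B =====
def f_alt (n : Int) : Int :=
  let st := (PySem.Int.toChars n).foldl (fun (st : Option Int × Option Int) c =>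
      let dig := pvChInt c
      (if PySem.Int.mod dig 2 = 1 then
         some (match st.1 with | none => dig | some lo => min lo dig) else st.1,
       if PySem.Int.mod dig 2 = 1 then
         some (match st.2 with | none => dig | some hi => max hi dig) else st.2))
    (none, none)
  match st.1, st.2 with
  | some lo, some hi => hi - lo
  | _, _ => -1

-- ===== PRECONDITION & SPEC =====
-- Pre_f excludes negative n: there str(n) starts with '-' and int('-') raises ValueError in A.
def Pre_f (n : Int) : Prop := 0 ≤ n
instance (n : Int) : Decidable (Pre_f n) := by unfold Pre_f; infer_instance
def pvWitness_f : Int := 135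

def Spec_f (n : Int) (out : Int) : Prop := out = f_alt n
instance (n : Int) (out : Int) : Decidable (Spec_f n out) := by unfold Spec_f; infer_instance

-- ===== CLAIM (what is proved, stated in full; the proofs are below) =====
def Claim_equal_f : Prop := ∀ (n : Int), Dom_f n → Pre_f n → Spec_f n (f n)

-- ===== LEMMAS AND PROOFS =====

-- mod (· ) 2 is 0 or 1, so the two ports' parity tests are complementary
theorem pvMod2_cases (d : Int) : PySem.Int.mod d 2 = 0 ∨ PySem.Int.mod d 2 = 1 := by
  have h1 := PySem.Int.mod_nonneg d (b := 2) (by omega)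
  have h2 := PySem.Int.mod_lt d (b := 2) (by omega)
  omega

-- A's loop builds exactly the odd digits, in order
theorem pvFoldA_eq (cs : List Char) :
    cs.foldl (fun acc c =>
      let dig := pvChInt c
      if PySem.Int.mod dig 2 = 0 then acc else acc ++ [pvChInt c]) [] =
    (cs.filter (fun c => decide (PySem.Int.mod (pvChInt c) 2 = 1))).map pvChInt := by
  have hstep : (fun (acc : List Int) (c : Char) =>
      let dig := pvChInt c
      if PySem.Int.mod dig 2 = 0 then acc else acc ++ [pvChInt c]) =
      (fun acc c => if PySem.Int.mod (pvChInt c) 2 = 1 then acc ++ [pvChInt c] else acc) := by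
    funext acc c
    show (if PySem.Int.mod (pvChInt c) 2 = 0 then acc else acc ++ [pvChInt c]) = _
    rcases pvMod2_cases (pvChInt c) with h | h
    · rw [if_pos h, if_neg (by omega)]
    · rw [if_neg (by omega), if_pos h]
  rw [hstep, PySem.List.foldl_append_ite]
  exact List.nil_append _

-- running min over `some a`
theorem pvMinFold_some (t : List Int) (a : Int) :
    t.foldl (fun (o : Option Int) (d : Int) =>
        some (match o with | none => d | some lo => min lo d)) (some a) =
    some (t.foldl min a) := by
  induction t generalizing a with
  | nil => rfl
  | cons x t ih => simpa using ih (min a x)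

-- running max over `some a`
theorem pvMaxFold_some (t : List Int) (a : Int) :
    t.foldl (fun (o : Option Int) (d : Int) =>
        some (match o with | none => d | some hi => max hi d)) (some a) =
    some (t.foldl max a) := by
  induction t generalizing a with
  | nil => rfl
  | cons x t ih => simpa using ih (max a x)

theorem pvPyGet_neg_one (l : List Int) (h : l ≠ []) :
    PySem.List.pyGet? l (-1) = some (l.getLast h) := by
  simp [PySem.List.pyGet?, PySem.List.pyIdx?]
  rw [if_pos (by simpa [Nat.one_le_iff_ne_zero] using h)]
  simp [List.getLast_eq_getElem]

theorem pvPyGet_zero (l : List Int) (x : Int) (s : List Int) (h : l = x :: s) :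
    PySem.List.pyGet? l 0 = some x := by
  subst h; simp [PySem.List.pyGet?, PySem.List.pyIdx?]

-- in a ≤-sorted list every element is ≤ the last one
theorem pvPairwise_le_getLast (l : List Int) (h : l ≠ []) (hp : l.Pairwise (· ≤ ·)) :
    ∀ y ∈ l, y ≤ l.getLast h := by
  induction l with
  | nil => simp at h
  | cons x t ih =>
    intro y hy
    rcases List.pairwise_cons.mp hp with ⟨hx, ht⟩
    cases t with
    | nil => simp at hy; simp [hy]
    | cons z s =>
      rw [List.getLast_cons (by simp)]
      rcases List.mem_cons.mp hy with rfl | hy'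
      · exact le_trans (hx z (by simp)) (ih (by simp) ht z (by simp))
      · exact ih (by simp) ht y hy'

-- head of sorted(x :: t) is the running min
theorem pvSorted_head (x : Int) (t : List Int) :
    (PySem.List.pyGet? (PySem.List.sorted (x :: t) (fun y => y) false) 0).getD 0 =
    t.foldl min x := by
  have hne : PySem.List.sorted (x :: t) (fun y => y) false ≠ [] := by
    rw [Ne, PySem.List.sorted_eq_nil_iff]; simp
  obtain ⟨m, s, hms⟩ := List.exists_cons_of_ne_nil hne
  rw [pvPyGet_zero _ m s hms, Option.getD_some]
  have hmem : ∀ y, y ∈ PySem.List.sorted (x :: t) (fun y => y) false ↔ y ∈ x :: t :=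
    fun y => PySem.List.mem_sorted _ _ _ _
  have hmlow : ∀ y ∈ x :: t, m ≤ y := PySem.List.key_head_sorted_le _ (fun y => y) hms
  have hmin_le := PySem.List.foldl_min_le t x
  have hmin_mem : t.foldl min x ∈ x :: t := by
    rcases PySem.List.foldl_min_mem t x with h | h
    · simp [h]
    · exact List.mem_cons_of_mem _ h
  have hm_mem : m ∈ x :: t := (hmem m).mp (by simp [hms])
  refine le_antisymm (hmlow _ hmin_mem) ?_
  rcases List.mem_cons.mp hm_mem with rfl | hmt
  · exact hmin_le.1
  · exact hmin_le.2 m hmt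

-- last of sorted(x :: t) is the running max
theorem pvSorted_last (x : Int) (t : List Int) :
    (PySem.List.pyGet? (PySem.List.sorted (x :: t) (fun y => y) false) (-1)).getD 0 =
    t.foldl max x := by
  have hne : PySem.List.sorted (x :: t) (fun y => y) false ≠ [] := by
    rw [Ne, PySem.List.sorted_eq_nil_iff]; simp
  rw [pvPyGet_neg_one _ hne, Option.getD_some]
  set L := PySem.List.sorted (x :: t) (fun y => y) false with hL
  have hp : L.Pairwise (· ≤ ·) := by
    simpa using PySem.List.sorted_pairwise (xs := x :: t) (key := fun y => y)
  have hhigh : ∀ y ∈ x :: t, y ≤ L.getLast hne := by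
    intro y hy
    exact pvPairwise_le_getLast L hne hp y ((PySem.List.mem_sorted _ _ _ _).mpr hy)
  have hmax_le := PySem.List.le_foldl_max t x
  have hmax_mem : t.foldl max x ∈ x :: t := by
    rcases PySem.List.foldl_max_mem t x with h | h
    · simp [h]
    · exact List.mem_cons_of_mem _ h
  have hlast_mem : L.getLast hne ∈ x :: t :=
    (PySem.List.mem_sorted _ _ _ _).mp (List.getLast_mem hne)
  refine le_antisymm ?_ (hhigh _ hmax_mem)
  rcases List.mem_cons.mp hlast_mem with h | h
  · rw [h]; exact hmax_le.1
  · exact hmax_le.2 _ h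

-- ===== VERDICT (by name: the statement is the Claim_ definition above) =====
theorem f_spec : Claim_equal_f := by
  intro n _ _
  unfold Spec_f f f_alt
  simp only
  rw [PySem.List.foldl_prod_mk
        (f := fun (o : Option Int) (c : Char) =>
          if PySem.Int.mod (pvChInt c) 2 = 1 then
            some (match o with | none => pvChInt c | some lo => min lo (pvChInt c)) else o)
        (g := fun (o : Option Int) (c : Char) =>
          if PySem.Int.mod (pvChInt c) 2 = 1 then
            some (match o with | none => pvChInt c | some hi => max hi (pvChInt c)) else o),
      PySem.List.foldl_ite_eq_foldl_filter, PySem.List.foldl_ite_eq_foldl_filter,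
      pvFoldA_eq]
  have hmap : ∀ (cs : List Char) (g : Option Int → Int → Option Int),
      cs.foldl (fun o c => g o (pvChInt c)) none = (cs.map pvChInt).foldl g none := by
    intro cs g; rw [List.foldl_map]
  set cs := (PySem.Int.toChars n).filter
      (fun c => decide (PySem.Int.mod (pvChInt c) 2 = 1)) with hcs
  rw [hmap cs (fun o d => some (match o with | none => d | some lo => min lo d)),
      hmap cs (fun o d => some (match o with | none => d | some hi => max hi d))]
  cases hds : cs.map pvChInt with
  | nil => simp
  | cons x t =>
    rw [if_neg (List.cons_ne_nil x t)]
    simp only [List.foldl_cons]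
    rw [pvMinFold_some, pvMaxFold_some]
    simp only
    rw [pvSorted_head, pvSorted_last]
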